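-- pv_equiv track=rewrite | github.com/Pedro6508/trabalho-arquitetura | arithmetic.py | shift_aux
-- ===== SOURCE A (Python) =====
-- def shift_aux(arr: [int], shift_size: int, shift_num: int):
--     shift_size00 = shift_size & 0b11
--     shift_num00 = shift_num & 0b11
--
--     total_shift = shift_size00*shift_num00
--
--     for i, bit in enumerate(arr):
--         shifted_i = i + total_shift
--         if shifted_i < len(arr):
--             arr[shifted_i] = bit
--         else:
--             arr[i] = 0
--
--     return arr
-- ===== SOURCE B (Python) =====
-- def shift_aux(arr, shift_size, shift_num):
--     # Closed-form rewrite: snapshot the low window once, then fill each cell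
--     # directly (mutates arr in place, like A, and returns it).
--     t = (shift_size & 0b11) * (shift_num & 0b11)
--     if t == 0:
--         return arr
--     n = len(arr)
--     base = arr[:t]
--     for k in range(n):
--         arr[k] = base[k % t] if k + t < n else 0
--     return arr
-- ===== Notes on version B (the rewrite author's own statement) =====
-- stated objective: alternative
-- what changed: Replaces A's in-place forward propagation (each step reads cells already overwritten by earlier steps) with a one-pass closed form: snapshot the first t elements once and set arr[k] = base[k % t] when k+t < n, else 0.
import Mathlib
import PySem

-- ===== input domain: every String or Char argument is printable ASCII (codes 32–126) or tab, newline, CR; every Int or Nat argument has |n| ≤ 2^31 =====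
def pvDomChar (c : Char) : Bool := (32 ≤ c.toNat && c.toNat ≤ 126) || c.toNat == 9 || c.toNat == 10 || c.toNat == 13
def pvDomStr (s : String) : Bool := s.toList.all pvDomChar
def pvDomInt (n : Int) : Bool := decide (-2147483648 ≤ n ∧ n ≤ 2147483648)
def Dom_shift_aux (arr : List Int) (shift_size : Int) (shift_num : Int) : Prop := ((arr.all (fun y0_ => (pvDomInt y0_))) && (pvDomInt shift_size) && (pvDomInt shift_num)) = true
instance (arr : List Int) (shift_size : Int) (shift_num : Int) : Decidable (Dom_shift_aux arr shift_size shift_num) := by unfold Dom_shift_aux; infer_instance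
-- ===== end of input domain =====

-- B replaces A's in-place forward propagation (reading already-overwritten cells)
-- with a one-pass closed form over a snapshot of the low window; same cost, different structure.
-- Both Pythons mutate arr in place; the equivalence proved here is about the return value.

-- ===== PORT A =====
-- One loop iteration of A: bit = arr[i] read from the LIVE list (enumerate over a
-- mutated list reads live values); total_shift ≥ 0, so arr[i + total_shift] is index
-- (i + total_shift.toNat) and the Python int comparison is the Int comparison below.
def shiftStep (total_shift : Int) (n : Nat) (s : List Int) (i : Nat) : List Int :=
  let bit := s.getD i 0
  if (i : Int) + total_shift < (n : Int) then s.set (i + total_shift.toNat) bit else s.set i 0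

def shift_aux (arr : List Int) (shift_size : Int) (shift_num : Int) : List Int :=
  let shift_size00 := PySem.Int.band shift_size 3
  let shift_num00 := PySem.Int.band shift_num 3
  let total_shift := shift_size00 * shift_num00
  (List.range arr.length).foldl (shiftStep total_shift arr.length) arr

-- ===== PORT B =====
-- Source B: t = (ss & 3) * (sn & 3); if t == 0 return arr; base = arr[:t];
-- for k in range(n): arr[k] = base[k % t] if k + t < n else 0  (t ≥ 0, so Nat arithmetic).
def shift_aux_alt (arr : List Int) (shift_size : Int) (shift_num : Int) : List Int :=
  let t := PySem.Int.band shift_size 3 * PySem.Int.band shift_num 3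
  if t == 0 then arr
  else
    let tn := t.toNat
    let n := arr.length
    let base := arr.take tn
    (List.range n).map (fun k => if k + tn < n then base.getD (k % tn) 0 else 0)

-- ===== PRECONDITION & SPEC =====
def Spec_shift_aux (arr : List Int) (shift_size : Int) (shift_num : Int) (out : List Int) : Prop := out = shift_aux_alt arr shift_size shift_num
instance (arr : List Int) (shift_size : Int) (shift_num : Int) (out : List Int) : Decidable (Spec_shift_aux arr shift_size shift_num out) := by unfold Spec_shift_aux; infer_instance

-- ===== CLAIM (what is proved, stated in full; the proofs are below) =====
def Claim_equal_shift_aux : Prop := ∀ (arr : List Int) (shift_size : Int) (shift_num : Int), Dom_shift_aux arr shift_size shift_num → Spec_shift_aux arr shift_size shift_num (shift_aux arr shift_size shift_num)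

-- ===== LEMMAS AND PROOFS =====

-- The value of the list after j iterations of A's loop, in closed form.
def shiftModel (arr : List Int) (tn j : Nat) : List Int :=
  (List.range arr.length).map (fun k =>
    if k < j ∧ arr.length ≤ k + tn then 0
    else if k < j + tn then arr.getD (k % tn) 0
    else arr.getD k 0)

theorem shiftModel_length (arr : List Int) (tn j : Nat) :
    (shiftModel arr tn j).length = arr.length := by
  simp [shiftModel]

theorem shiftModel_zero (arr : List Int) (tn : Nat) (_h1tn : 1 ≤ tn) :
    shiftModel arr tn 0 = arr := by
  apply List.ext_getElem
  · simp [shiftModel]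
  · intro k h1 h2
    simp only [shiftModel, List.getElem_map, List.getElem_range]
    have hk : k < arr.length := by simpa [shiftModel] using h1
    split_ifs with hA hB
    · omega
    · have : k % tn = k := Nat.mod_eq_of_lt (by omega)
      simp [this, hk]
    · simp [hk]

theorem shiftStep_model (arr : List Int) (t : Int) (ht : 1 ≤ t) (j : Nat)
    (hj : j < arr.length) :
    shiftStep t arr.length (shiftModel arr t.toNat j) j = shiftModel arr t.toNat (j + 1) := by
  have htval : ((t.toNat : Nat) : Int) = t := Int.toNat_of_nonneg (by omega)
  have htn1 : 1 ≤ t.toNat := by omega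
  have hbit : (shiftModel arr t.toNat j).getD j 0 = arr.getD (j % t.toNat) 0 := by
    have hlen : j < (shiftModel arr t.toNat j).length := by rw [shiftModel_length]; omega
    rw [List.getD_eq_getElem _ _ hlen]
    simp only [shiftModel, List.getElem_map, List.getElem_range]
    split_ifs with hA hB
    · omega
    · rfl
    · omega
  unfold shiftStep
  simp only [hbit]
  by_cases hc : j + t.toNat < arr.length
  · rw [if_pos (by omega : (j : Int) + t < (arr.length : Int))]
    apply List.ext_getElem
    · simp [shiftModel_length]
    · intro k h1 h2
      have hk : k < arr.length := by simpa [shiftModel_length] using h2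
      by_cases hkj : k = j + t.toNat
      · subst hkj
        rw [List.getElem_set, if_pos rfl]
        simp only [shiftModel, List.getElem_map, List.getElem_range]
        rw [Nat.add_mod_right]
        split_ifs <;> first | rfl | omega
      · rw [List.getElem_set, if_neg (by omega : ¬ j + t.toNat = k)]
        simp only [shiftModel, List.getElem_map, List.getElem_range]
        split_ifs <;> first | rfl | omega
  · rw [if_neg (by omega : ¬ (j : Int) + t < (arr.length : Int))]
    apply List.ext_getElem
    · simp [shiftModel_length]
    · intro k h1 h2
      have hk : k < arr.length := by simpa [shiftModel_length] using h2
      by_cases hkj : k = j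
      · subst hkj
        rw [List.getElem_set, if_pos rfl]
        simp only [shiftModel, List.getElem_map, List.getElem_range]
        split_ifs <;> first | rfl | omega
      · rw [List.getElem_set, if_neg (by omega : ¬ j = k)]
        simp only [shiftModel, List.getElem_map, List.getElem_range]
        split_ifs <;> first | rfl | omega

theorem shift_loop_model (arr : List Int) (t : Int) (ht : 1 ≤ t) :
    ∀ j, j ≤ arr.length →
      (List.range j).foldl (shiftStep t arr.length) arr = shiftModel arr t.toNat j := by
  intro j
  induction j with
  | zero => intro _; simpa using (shiftModel_zero arr t.toNat (by omega)).symm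
  | succ j ih =>
    intro hj
    rw [List.range_succ, List.foldl_append, ih (by omega)]
    simpa using shiftStep_model arr t ht j (by omega)

theorem shiftStep_zero_id (arr : List Int) (j : Nat) (hj : j < arr.length) :
    shiftStep 0 arr.length arr j = arr := by
  unfold shiftStep
  rw [if_pos (by omega : (j : Int) + 0 < (arr.length : Int))]
  apply List.ext_getElem
  · simp
  · intro k h1 h2
    rw [List.getElem_set]
    by_cases hkj : j + (0 : Int).toNat = k
    · rw [if_pos hkj]
      have hk : k < arr.length := by simpa using h2
      rw [List.getD_eq_getElem _ _ (by omega : j < arr.length)]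
      have : j = k := by omega
      subst this
      simp
    · rw [if_neg hkj]

theorem shift_loop_id (arr : List Int) :
    ∀ j, j ≤ arr.length → (List.range j).foldl (shiftStep 0 arr.length) arr = arr := by
  intro j
  induction j with
  | zero => intro _; rfl
  | succ j ih =>
    intro hj
    rw [List.range_succ, List.foldl_append, ih (by omega)]
    simpa using shiftStep_zero_id arr j (by omega)

-- ===== VERDICT (by name: the statement is the Claim_ definition above) =====
theorem shift_aux_spec : Claim_equal_shift_aux := by
  intro arr shift_size shift_num _
  unfold Spec_shift_aux
  show shift_aux arr shift_size shift_num = shift_aux_alt arr shift_size shift_num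
  simp only [shift_aux, shift_aux_alt]
  have ht0 : 0 ≤ PySem.Int.band shift_size 3 * PySem.Int.band shift_num 3 := by
    apply mul_nonneg
    · rw [PySem.Int.band_comm]
      exact PySem.Int.band_nonneg_of_nonneg_left _ (by norm_num)
    · rw [PySem.Int.band_comm]
      exact PySem.Int.band_nonneg_of_nonneg_left _ (by norm_num)
  generalize hT : PySem.Int.band shift_size 3 * PySem.Int.band shift_num 3 = t at ht0 ⊢
  by_cases hz : t = 0
  · subst hz
    simp only [beq_self_eq_true, if_true]
    exact shift_loop_id arr arr.length (le_refl _)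
  · have ht1 : 1 ≤ t := by omega
    rw [if_neg (by simpa using hz)]
    rw [shift_loop_model arr t ht1 arr.length (le_refl _)]
    apply List.ext_getElem
    · simp [shiftModel]
    · intro k h1 h2
      have hk : k < arr.length := by simpa [shiftModel_length] using h1
      simp only [shiftModel, List.getElem_map, List.getElem_range]
      by_cases hc : k + t.toNat < arr.length
      · rw [if_pos hc]
        rw [if_neg (by omega : ¬ (k < arr.length ∧ arr.length ≤ k + t.toNat)),
            if_pos (by omega : k < arr.length + t.toNat)]
        have hmod : k % t.toNat < t.toNat := Nat.mod_lt _ (by omega)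
        have hbl : (arr.take t.toNat).length = t.toNat := by simp; omega
        rw [List.getD_eq_getElem _ _ (by omega : k % t.toNat < arr.length),
            List.getD_eq_getElem _ _ (by rw [hbl]; exact hmod)]
        simp [List.getElem_take]
      · rw [if_neg hc, if_pos (by omega : k < arr.length ∧ arr.length ≤ k + t.toNat)]
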